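-- pv_equiv track=rewrite | github.com/mrrajamiaraj/cse-327-project | core/huggingface_service.py | generate_mood_tags
-- ===== SOURCE A (Python) =====
-- def generate_mood_tags(name, category):
--     """Generate mood-based tags"""
--     text = f"{name} {category}".lower()
--     tags = []
--
--     if any(word in text for word in ['comfort', 'biryani', 'curry', 'pasta']):
--         tags.append('comfort_food')
--     if any(word in text for word in ['energy', 'coffee', 'tea', 'smoothie']):
--         tags.append('energy_boost')
--     if any(word in text for word in ['celebration', 'cake', 'dessert', 'special']):
--         tags.append('celebratory')
--     if any(word in text for word in ['light', 'salad', 'soup']):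
--         tags.append('light_meal')
--
--     # Temperature-based tags
--     if any(word in text for word in ['coffee', 'tea', 'hot chocolate', 'warm']):
--         tags.append('hot_drink')
--     if any(word in text for word in ['lassi', 'juice', 'cold coffee', 'iced', 'smoothie']):
--         tags.append('cold_drink')
--
--     return tags
-- ===== SOURCE B (Python) =====
-- KEYWORD_TAGS = {
--     'comfort': ['comfort_food'], 'biryani': ['comfort_food'],
--     'curry': ['comfort_food'], 'pasta': ['comfort_food'],
--     'energy': ['energy_boost'],
--     'coffee': ['energy_boost', 'hot_drink'], 'tea': ['energy_boost', 'hot_drink'],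
--     'celebration': ['celebratory'], 'cake': ['celebratory'],
--     'dessert': ['celebratory'], 'special': ['celebratory'],
--     'light': ['light_meal'], 'salad': ['light_meal'], 'soup': ['light_meal'],
--     'hot chocolate': ['hot_drink'], 'warm': ['hot_drink'],
--     'lassi': ['cold_drink'], 'juice': ['cold_drink'],
--     'cold coffee': ['cold_drink'], 'iced': ['cold_drink'],
--     'smoothie': ['energy_boost', 'cold_drink'],
-- }
-- TAG_ORDER = ['comfort_food', 'energy_boost', 'celebratory',
--              'light_meal', 'hot_drink', 'cold_drink']
--
-- def generate_mood_tags(name, category):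
--     """Generate mood-based tags via an inverted keyword->tags index"""
--     text = f"{name} {category}".lower()
--     hit = [t for w, ts in KEYWORD_TAGS.items() if w in text for t in ts]
--     return [t for t in TAG_ORDER if t in hit]
-- ===== Notes on version B (the rewrite author's own statement) =====
-- stated objective: alternative
-- what changed: Inverted the rule direction: instead of six per-tag any-keyword branches, B uses a keyword->tags index, collects the tags of every keyword found in the text, and emits the fixed tag order filtered by membership in that hit list.
import Mathlib
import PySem

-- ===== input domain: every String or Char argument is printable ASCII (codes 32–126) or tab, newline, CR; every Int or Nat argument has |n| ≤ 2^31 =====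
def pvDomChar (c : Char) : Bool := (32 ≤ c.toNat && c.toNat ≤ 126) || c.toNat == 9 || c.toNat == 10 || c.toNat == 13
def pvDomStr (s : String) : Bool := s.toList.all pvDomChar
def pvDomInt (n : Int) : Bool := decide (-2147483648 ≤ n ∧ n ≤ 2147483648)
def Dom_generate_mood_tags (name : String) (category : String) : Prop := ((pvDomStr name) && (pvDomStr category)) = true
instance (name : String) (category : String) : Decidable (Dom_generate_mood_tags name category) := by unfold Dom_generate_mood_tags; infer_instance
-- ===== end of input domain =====

-- B replaces A's six hard-coded if/append branches with an inverted keyword→tags index: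
-- collect the tags of every keyword occurring in the text, then emit the canonical tag
-- order filtered by membership (objective: alternative).

-- ===== PORT A =====
-- f"{name} {category}".lower(); six sequential if/append branches.
def generate_mood_tags (name : String) (category : String) : List String :=
  let text := PySem.Str.lower (String.ofList (name.toList ++ [' '] ++ category.toList))
  let tags : List String := []
  let tags := if (["comfort", "biryani", "curry", "pasta"].any fun word => PySem.Str.isIn word text)
              then tags ++ ["comfort_food"] else tags
  let tags := if (["energy", "coffee", "tea", "smoothie"].any fun word => PySem.Str.isIn word text)
              then tags ++ ["energy_boost"] else tags
  let tags := if (["celebration", "cake", "dessert", "special"].any fun word => PySem.Str.isIn word text)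
              then tags ++ ["celebratory"] else tags
  let tags := if (["light", "salad", "soup"].any fun word => PySem.Str.isIn word text)
              then tags ++ ["light_meal"] else tags
  let tags := if (["coffee", "tea", "hot chocolate", "warm"].any fun word => PySem.Str.isIn word text)
              then tags ++ ["hot_drink"] else tags
  let tags := if (["lassi", "juice", "cold coffee", "iced", "smoothie"].any fun word => PySem.Str.isIn word text)
              then tags ++ ["cold_drink"] else tags
  tags

-- ===== PORT B =====
-- KEYWORD_TAGS dict (insertion order) as an association list
def keywordTags : List (String × List String) :=
  [ ("comfort", ["comfort_food"]), ("biryani", ["comfort_food"]),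
    ("curry", ["comfort_food"]), ("pasta", ["comfort_food"]),
    ("energy", ["energy_boost"]),
    ("coffee", ["energy_boost", "hot_drink"]), ("tea", ["energy_boost", "hot_drink"]),
    ("celebration", ["celebratory"]), ("cake", ["celebratory"]),
    ("dessert", ["celebratory"]), ("special", ["celebratory"]),
    ("light", ["light_meal"]), ("salad", ["light_meal"]), ("soup", ["light_meal"]),
    ("hot chocolate", ["hot_drink"]), ("warm", ["hot_drink"]),
    ("lassi", ["cold_drink"]), ("juice", ["cold_drink"]),
    ("cold coffee", ["cold_drink"]), ("iced", ["cold_drink"]),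
    ("smoothie", ["energy_boost", "cold_drink"]) ]

def tagOrder : List String :=
  ["comfort_food", "energy_boost", "celebratory", "light_meal", "hot_drink", "cold_drink"]

def generate_mood_tags_alt (name : String) (category : String) : List String :=
  let text := PySem.Str.lower (String.ofList (name.toList ++ [' '] ++ category.toList))
  let hit := (keywordTags.filter fun p => PySem.Str.isIn p.1 text).flatMap (·.2)
  tagOrder.filter (fun t => hit.contains t)

-- ===== PRECONDITION & SPEC =====
def Spec_generate_mood_tags (name : String) (category : String) (out : List String) : Prop := out = generate_mood_tags_alt name category
instance (name : String) (category : String) (out : List String) : Decidable (Spec_generate_mood_tags name category out) := by unfold Spec_generate_mood_tags; infer_instance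

-- ===== CLAIM (what is proved, stated in full; the proofs are below) =====
def Claim_equal_generate_mood_tags : Prop := ∀ (name : String) (category : String), Dom_generate_mood_tags name category → Spec_generate_mood_tags name category (generate_mood_tags name category)

-- ===== LEMMAS AND PROOFS =====

-- membership in the flattened tag lists of the keywords passing the filter
theorem contains_flatMap_filter {α : Type} (l : List (α × List String)) (q : α × List String → Bool) (a : String) :
    (((l.filter q).flatMap (·.2)).contains a) = l.any (fun p => q p && (p.2.contains a)) := by
  induction l with
  | nil => rfl
  | cons p rest ih =>
    cases hq : q p
    · rw [List.any_cons, hq, List.filter_cons_of_neg (by simp [hq]), ih]; simp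
    · rw [List.any_cons, hq, List.filter_cons_of_pos hq, List.flatMap_cons, List.contains_append, ih]; simp

-- per-tag characterisation of B's inverted index: tag is hit iff one of its rule's keywords occurs
theorem hit_comfort (t : String) :
    (((keywordTags.filter fun p => PySem.Str.isIn p.1 t).flatMap (·.2)).contains "comfort_food")
    = (["comfort", "biryani", "curry", "pasta"].any fun word => PySem.Str.isIn word t) := by
  simp only [keywordTags, contains_flatMap_filter, List.any_cons, List.any_nil, List.contains_cons,
    List.contains_nil, String.reduceBEq, Bool.and_true, Bool.and_false, Bool.or_false]

theorem hit_energy (t : String) :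
    (((keywordTags.filter fun p => PySem.Str.isIn p.1 t).flatMap (·.2)).contains "energy_boost")
    = (["energy", "coffee", "tea", "smoothie"].any fun word => PySem.Str.isIn word t) := by
  simp only [keywordTags, contains_flatMap_filter, List.any_cons, List.any_nil, List.contains_cons,
    List.contains_nil, String.reduceBEq, Bool.and_true, Bool.and_false, Bool.or_false, Bool.false_or]

theorem hit_celebr (t : String) :
    (((keywordTags.filter fun p => PySem.Str.isIn p.1 t).flatMap (·.2)).contains "celebratory")
    = (["celebration", "cake", "dessert", "special"].any fun word => PySem.Str.isIn word t) := by
  simp only [keywordTags, contains_flatMap_filter, List.any_cons, List.any_nil, List.contains_cons,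
    List.contains_nil, String.reduceBEq, Bool.and_true, Bool.and_false, Bool.or_false, Bool.false_or]

theorem hit_light (t : String) :
    (((keywordTags.filter fun p => PySem.Str.isIn p.1 t).flatMap (·.2)).contains "light_meal")
    = (["light", "salad", "soup"].any fun word => PySem.Str.isIn word t) := by
  simp only [keywordTags, contains_flatMap_filter, List.any_cons, List.any_nil, List.contains_cons,
    List.contains_nil, String.reduceBEq, Bool.and_true, Bool.and_false, Bool.or_false, Bool.false_or]

theorem hit_hot (t : String) :
    (((keywordTags.filter fun p => PySem.Str.isIn p.1 t).flatMap (·.2)).contains "hot_drink")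
    = (["coffee", "tea", "hot chocolate", "warm"].any fun word => PySem.Str.isIn word t) := by
  simp only [keywordTags, contains_flatMap_filter, List.any_cons, List.any_nil, List.contains_cons,
    List.contains_nil, String.reduceBEq, Bool.and_true, Bool.and_false, Bool.or_false, Bool.false_or]

theorem hit_cold (t : String) :
    (((keywordTags.filter fun p => PySem.Str.isIn p.1 t).flatMap (·.2)).contains "cold_drink")
    = (["lassi", "juice", "cold coffee", "iced", "smoothie"].any fun word => PySem.Str.isIn word t) := by
  simp only [keywordTags, contains_flatMap_filter, List.any_cons, List.any_nil, List.contains_cons,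
    List.contains_nil, String.reduceBEq, Bool.and_true, Bool.and_false, Bool.or_false, Bool.false_or]

-- ===== VERDICT (by name: the statement is the Claim_ definition above) =====
theorem generate_mood_tags_spec : Claim_equal_generate_mood_tags := by
  intro name category _
  unfold Spec_generate_mood_tags generate_mood_tags generate_mood_tags_alt tagOrder
  generalize (PySem.Str.lower (String.ofList (name.toList ++ [' '] ++ category.toList))) = t
  dsimp only
  simp only [List.filter_cons, List.filter_nil, hit_comfort, hit_energy, hit_celebr, hit_light,
    hit_hot, hit_cold]
  generalize (["comfort", "biryani", "curry", "pasta"].any fun word => PySem.Str.isIn word t) = b1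
  generalize (["energy", "coffee", "tea", "smoothie"].any fun word => PySem.Str.isIn word t) = b2
  generalize (["celebration", "cake", "dessert", "special"].any fun word => PySem.Str.isIn word t) = b3
  generalize (["light", "salad", "soup"].any fun word => PySem.Str.isIn word t) = b4
  generalize (["coffee", "tea", "hot chocolate", "warm"].any fun word => PySem.Str.isIn word t) = b5
  generalize (["lassi", "juice", "cold coffee", "iced", "smoothie"].any fun word => PySem.Str.isIn word t) = b6
  cases b1 <;> cases b2 <;> cases b3 <;> cases b4 <;> cases b5 <;> cases b6 <;> rfl
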